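-- pv_equiv track=rewrite | github.com/Praveshgairee/Final_Submission | Task_2/cat_shelter.py | analyze_cat_data
-- ===== SOURCE A (Python) =====
-- def analyze_cat_data(lines):
--     total_visits, intruder_attacks, total_time = 0, 0, 0
--     visit_lengths = []
--
--     for line in lines:
--         if line.strip() == 'END':
--             break
--
--         parts = line.split(',')
--         if parts[0] == 'OURS':
--             total_visits += 1
--             entry_time, exit_time = int(parts[1]), int(parts[2])
--             visit_length = exit_time - entry_time
--             visit_lengths.append(visit_length)
--             total_time += visit_length
--         elif parts[0] == 'THEIRS':
--             intruder_attacks += 1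
--
--     return total_visits, intruder_attacks, total_time, visit_lengths
-- ===== SOURCE B (Python) =====
-- def _solve(lines):
--     # returns (total_visits, intruder_attacks, total_time, visit_lengths, saw_end)
--     if len(lines) == 0:
--         return 0, 0, 0, [], False
--     if len(lines) == 1:
--         line = lines[0]
--         if line.strip() == 'END':
--             return 0, 0, 0, [], True
--         parts = line.split(',')
--         if parts[0] == 'OURS':
--             d = int(parts[2]) - int(parts[1])
--             return 1, 0, d, [d], False
--         if parts[0] == 'THEIRS':
--             return 0, 1, 0, [], False
--         return 0, 0, 0, [], False
--     mid = len(lines) // 2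
--     lt = _solve(lines[:mid])
--     if lt[4]:
--         return lt
--     rt = _solve(lines[mid:])
--     return lt[0] + rt[0], lt[1] + rt[1], lt[2] + rt[2], lt[3] + rt[3], rt[4]
--
--
-- def analyze_cat_data(lines):
--     tv, ia, tt, vl, _ = _solve(lines)
--     return tv, ia, tt, vl
-- ===== Notes on version B (the rewrite author's own statement) =====
-- stated objective: alternative
-- what changed: B replaces A's single left-to-right accumulating loop with a divide-and-conquer: it recursively solves the two halves of the list, combines the halves' (visits, attacks, time, lengths) tuples additively, and propagates a saw-END flag so the right half is discarded (never solved) when the left half contains the END sentinel.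
import Mathlib
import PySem

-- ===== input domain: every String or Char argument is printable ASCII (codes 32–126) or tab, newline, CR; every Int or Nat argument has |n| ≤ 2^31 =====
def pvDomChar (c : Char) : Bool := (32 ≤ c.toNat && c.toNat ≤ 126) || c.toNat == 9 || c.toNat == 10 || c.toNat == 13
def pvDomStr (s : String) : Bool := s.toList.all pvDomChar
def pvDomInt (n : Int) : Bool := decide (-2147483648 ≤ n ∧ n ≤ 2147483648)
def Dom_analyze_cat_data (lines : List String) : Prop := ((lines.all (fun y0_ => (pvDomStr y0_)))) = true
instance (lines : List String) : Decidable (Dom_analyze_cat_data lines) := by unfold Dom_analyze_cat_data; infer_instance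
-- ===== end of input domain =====

-- B replaces A's single accumulating loop with a divide-and-conquer over list halves combined
-- additively with a saw-END flag; objective: alternative. Return-value equivalence only.

-- ===== PORT A =====
-- line.split(',') : sep ≠ "" so split? is always some; exact
def pvSplitComma (l : String) : List String := (PySem.Str.split? l ",").getD []

-- the for-loop of A: structural recursion over the lines carrying A's four accumulators;
-- int(parts[i]) is (pyGet? … ).bind ofStr? — Pre_ guarantees it is some on admitted inputs,
-- the .getD 0 default is never reached there
def acdGo (rest : List String) (tv ia tt : Int) (vl : List Int) : Int × Int × Int × List Int :=
  match rest with
  | [] => (tv, ia, tt, vl)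
  | line :: rest' =>
    if PySem.Str.strip line = "END" then (tv, ia, tt, vl)
    else
      let parts := pvSplitComma line
      if PySem.List.pyGet? parts 0 = some "OURS" then
        let entry_time := ((PySem.List.pyGet? parts 1).bind PySem.Int.ofStr?).getD 0
        let exit_time  := ((PySem.List.pyGet? parts 2).bind PySem.Int.ofStr?).getD 0
        let visit_length := exit_time - entry_time
        acdGo rest' (tv + 1) ia (tt + visit_length) (vl ++ [visit_length])
      else if PySem.List.pyGet? parts 0 = some "THEIRS" then
        acdGo rest' tv (ia + 1) tt vl
      else
        acdGo rest' tv ia tt vl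

def analyze_cat_data (lines : List String) : Int × Int × Int × List Int :=
  acdGo lines 0 0 0 []

-- ===== PORT B =====
-- _solve of Source B: divide and conquer; returns (tv, ia, tt, vl, saw_end).
-- lines[0] is pyGetD … 0 (in range: length = 1 in that branch); lines[:mid] / lines[mid:]
-- are PySem.List.slice; len(lines)//2 on a nonnegative length is PySem.Int.floordiv — exact.
def pvSolveF : Nat → List String → Int × Int × Int × List Int × Bool
  | 0, _ => (0, 0, 0, [], false)
  | fuel+1, xs =>
    if xs.length = 0 then (0, 0, 0, [], false)
    else if xs.length = 1 then
      let line := PySem.List.pyGetD xs 0 ""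
      if PySem.Str.strip line = "END" then (0, 0, 0, [], true)
      else
        let parts := pvSplitComma line
        if PySem.List.pyGet? parts 0 = some "OURS" then
          let d := ((PySem.List.pyGet? parts 2).bind PySem.Int.ofStr?).getD 0
                   - ((PySem.List.pyGet? parts 1).bind PySem.Int.ofStr?).getD 0
          (1, 0, d, [d], false)
        else if PySem.List.pyGet? parts 0 = some "THEIRS" then (0, 1, 0, [], false)
        else (0, 0, 0, [], false)
    else
      let mid := PySem.Int.floordiv (xs.length : Int) 2
      let lt := pvSolveF fuel (PySem.List.slice xs none (some mid))
      if lt.2.2.2.2 then lt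
      else
        let rt := pvSolveF fuel (PySem.List.slice xs (some mid) none)
        (lt.1 + rt.1, lt.2.1 + rt.2.1, lt.2.2.1 + rt.2.2.1, lt.2.2.2.1 ++ rt.2.2.2.1, rt.2.2.2.2)

-- the fuel xs.length is never exhausted (each half is strictly shorter), so this is exactly _solve
def pvSolve (xs : List String) : Int × Int × Int × List Int × Bool :=
  pvSolveF xs.length xs

def analyze_cat_data_alt (lines : List String) : Int × Int × Int × List Int :=
  let s := pvSolve lines
  (s.1, s.2.1, s.2.2.1, s.2.2.2.1)

-- ===== PRECONDITION & SPEC =====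
-- a processed line is safe: if it is an OURS row, fields 1 and 2 exist and parse as Python ints
def pvOkLine (l : String) : Bool :=
  let p := pvSplitComma l
  if PySem.List.pyGet? p 0 = some "OURS" then
    ((PySem.List.pyGet? p 1).bind PySem.Int.ofStr?).isSome
      && ((PySem.List.pyGet? p 2).bind PySem.Int.ofStr?).isSome
  else true

-- Pre_ excludes exactly the inputs on which Python A raises: a line before the first stripped
-- 'END' whose first comma-field is 'OURS' but whose second or third field is missing or not int()-parsable
def Pre_analyze_cat_data (lines : List String) : Prop :=
  (lines.takeWhile (fun l => PySem.Str.strip l ≠ "END")).all pvOkLine = true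
instance (lines : List String) : Decidable (Pre_analyze_cat_data lines) := by
  unfold Pre_analyze_cat_data; infer_instance

def pvWitness_analyze_cat_data : List String := []

def Spec_analyze_cat_data (lines : List String) (out : Int × Int × Int × List Int) : Prop := out = analyze_cat_data_alt lines
instance (lines : List String) (out : Int × Int × Int × List Int) : Decidable (Spec_analyze_cat_data lines out) := by unfold Spec_analyze_cat_data; infer_instance

-- ===== CLAIM (what is proved, stated in full; the proofs are below) =====
def Claim_equal_analyze_cat_data : Prop := ∀ (lines : List String), Dom_analyze_cat_data lines → Pre_analyze_cat_data lines → Spec_analyze_cat_data lines (analyze_cat_data lines)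

-- ===== LEMMAS AND PROOFS =====
-- common reference shape: the stats of the prefix of lines before the first stripped 'END'
def pvIsOurs (l : String) : Bool := PySem.List.pyGet? (pvSplitComma l) 0 == some "OURS"
def pvRowVL (l : String) : Int :=
  ((PySem.List.pyGet? (pvSplitComma l) 2).bind PySem.Int.ofStr?).getD 0
    - ((PySem.List.pyGet? (pvSplitComma l) 1).bind PySem.Int.ofStr?).getD 0
def pvVLs (xs : List String) : List Int := (xs.filter pvIsOurs).map pvRowVL
def pvIA (xs : List String) : Int :=
  ((xs.filter (fun l => PySem.List.pyGet? (pvSplitComma l) 0 == some "THEIRS")).length : Int)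
def pvNotEnd (l : String) : Bool := !(PySem.Str.strip l == "END")
def pvPrefix (xs : List String) : List String := xs.takeWhile pvNotEnd
def pvStats (xs : List String) : Int × Int × Int × List Int :=
  (((pvVLs xs).length : Int), pvIA xs, (pvVLs xs).sum, pvVLs xs)
-- A's loop equals pvStats of the prefix shifted by the accumulators
lemma acdGo_eq_stats (lines : List String) :
    ∀ (tv ia tt : Int) (vl : List Int),
      acdGo lines tv ia tt vl =
        (tv + (pvStats (pvPrefix lines)).1,
         ia + (pvStats (pvPrefix lines)).2.1,
         tt + (pvStats (pvPrefix lines)).2.2.1,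
         vl ++ (pvStats (pvPrefix lines)).2.2.2) := by
  induction lines with
  | nil => intro tv ia tt vl; simp [acdGo, pvStats, pvPrefix, pvVLs, pvIA]
  | cons line rest ih =>
    intro tv ia tt vl
    by_cases hEnd : PySem.Str.strip line = "END"
    · have hpne : pvNotEnd line = false := by simp [pvNotEnd, hEnd]
      simp [acdGo, hEnd, pvStats, pvPrefix, List.takeWhile_cons, hpne, pvVLs, pvIA]
    · have hpne : pvNotEnd line = true := by simp [pvNotEnd, hEnd]
      by_cases hOurs : PySem.List.pyGet? (pvSplitComma line) 0 = some "OURS"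
      · have hIs : pvIsOurs line = true := by simp [pvIsOurs, hOurs]
        have hTh : ¬ ((PySem.List.pyGet? (pvSplitComma line) 0 == some "THEIRS") = true) := by
          simp [hOurs]
        simp only [acdGo, if_neg hEnd, if_pos hOurs]
        rw [ih]
        simp only [pvStats, pvPrefix, List.takeWhile_cons, hpne, if_pos, pvVLs, pvIA,
          List.filter_cons, hIs, if_true, hTh, if_false, List.map_cons, List.sum_cons,
          List.length_cons]
        have hrow : pvRowVL line
            = ((PySem.List.pyGet? (pvSplitComma line) 2).bind PySem.Int.ofStr?).getD 0
              - ((PySem.List.pyGet? (pvSplitComma line) 1).bind PySem.Int.ofStr?).getD 0 := rfl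
        refine Prod.ext ?_ (Prod.ext ?_ (Prod.ext ?_ ?_)) <;>
          simp [hrow, List.append_assoc] <;> push_cast <;> ring
      · have hIs : pvIsOurs line = false := by simp [pvIsOurs, hOurs]
        by_cases hTh : PySem.List.pyGet? (pvSplitComma line) 0 = some "THEIRS"
        · simp only [acdGo, if_neg hEnd, if_neg hOurs, if_pos hTh]
          rw [ih]
          simp only [pvStats, pvPrefix, List.takeWhile_cons, hpne, if_pos, pvVLs, pvIA,
            List.filter_cons, hIs, hTh, List.length_cons]
          refine Prod.ext ?_ (Prod.ext ?_ (Prod.ext ?_ ?_)) <;> simp <;> push_cast <;> ring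
        · simp only [acdGo, if_neg hEnd, if_neg hOurs, if_neg hTh]
          rw [ih]
          have hTh' : ¬ ((PySem.List.pyGet? (pvSplitComma line) 0 == some "THEIRS") = true) := by
            simp [hTh]
          simp only [pvStats, pvPrefix, List.takeWhile_cons, hpne, if_pos, pvVLs, pvIA,
            List.filter_cons, hIs, hTh', if_false, Bool.false_eq_true]

-- pvStats is additive on append
lemma pvStats_append (a b : List String) :
    pvStats (a ++ b) =
      ((pvStats a).1 + (pvStats b).1, (pvStats a).2.1 + (pvStats b).2.1,
       (pvStats a).2.2.1 + (pvStats b).2.2.1, (pvStats a).2.2.2 ++ (pvStats b).2.2.2) := by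
  refine Prod.ext ?_ (Prod.ext ?_ (Prod.ext ?_ ?_)) <;>
    simp [pvStats, pvVLs, pvIA, List.filter_append] <;> push_cast <;> ring

-- prefix of an append: cut in the left part or pass through it
lemma pvPrefix_append_of_end (a b : List String)
    (h : a.any (fun l => PySem.Str.strip l == "END") = true) :
    pvPrefix (a ++ b) = pvPrefix a := by
  induction a with
  | nil => simp at h
  | cons x a ih =>
    by_cases hx : PySem.Str.strip x = "END"
    · simp [pvPrefix, List.takeWhile_cons, pvNotEnd, hx]
    · have h' : a.any (fun l => PySem.Str.strip l == "END") = true := by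
        simpa [hx] using h
      have := ih h'
      simp only [pvPrefix, List.cons_append, List.takeWhile_cons, pvNotEnd, hx] at this ⊢
      simp [this]

lemma pvPrefix_append_of_no_end (a b : List String)
    (h : a.any (fun l => PySem.Str.strip l == "END") = false) :
    pvPrefix (a ++ b) = a ++ pvPrefix b := by
  induction a with
  | nil => simp [pvPrefix]
  | cons x a ih =>
    simp only [List.any_cons, Bool.or_eq_false_iff, beq_eq_false_iff_ne, ne_eq] at h
    have := ih (by simpa using h.2)
    simp only [pvPrefix, List.cons_append, List.takeWhile_cons, pvNotEnd, h.1] at this ⊢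
    simp [h.1, this]

lemma pvPrefix_of_no_end (a : List String)
    (h : a.any (fun l => PySem.Str.strip l == "END") = false) :
    pvPrefix a = a := by
  have := pvPrefix_append_of_no_end a [] h
  simpa [pvPrefix] using this

-- B's divide-and-conquer computes pvStats of the prefix plus the saw-END flag
lemma pvSolveF_spec : ∀ (fuel : Nat) (xs : List String), xs.length ≤ fuel →
    pvSolveF fuel xs = ((pvStats (pvPrefix xs)).1, (pvStats (pvPrefix xs)).2.1,
      (pvStats (pvPrefix xs)).2.2.1, (pvStats (pvPrefix xs)).2.2.2,
      xs.any (fun l => PySem.Str.strip l == "END")) := by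
  intro fuel
  induction fuel with
  | zero =>
    intro xs hlen
    have : xs = [] := List.length_eq_zero_iff.mp (Nat.le_zero.mp hlen)
    subst this
    simp [pvSolveF, pvStats, pvPrefix, pvVLs, pvIA]
  | succ fuel ih =>
    intro xs hlen
    rw [pvSolveF]
    by_cases h0 : xs.length = 0
    · have : xs = [] := List.length_eq_zero_iff.mp h0
      subst this
      simp [pvStats, pvPrefix, pvVLs, pvIA]
    · by_cases h1 : xs.length = 1
      · obtain ⟨x, hx⟩ := List.length_eq_one_iff.mp h1
        subst hx
        simp only [List.length_cons, List.length_nil, h0, if_false, if_pos h1,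
          PySem.List.pyGetD_zero_cons]
        by_cases hEnd : PySem.Str.strip x = "END"
        · simp [hEnd, pvStats, pvPrefix, pvNotEnd, pvVLs, pvIA]
        · by_cases hOurs : PySem.List.pyGet? (pvSplitComma x) 0 = some "OURS"
          · simp [hEnd, hOurs, pvStats, pvPrefix, pvNotEnd, pvVLs, pvIA, pvIsOurs, pvRowVL]
          · by_cases hTh : PySem.List.pyGet? (pvSplitComma x) 0 = some "THEIRS"
            · simp [hEnd, hOurs, hTh, pvStats, pvPrefix, pvNotEnd, pvVLs, pvIA, pvIsOurs]
            · simp [hEnd, hOurs, hTh, pvStats, pvPrefix, pvNotEnd, pvVLs, pvIA, pvIsOurs]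
      · -- recursive case: xs.length ≥ 2
        have h2 : 2 ≤ xs.length := by omega
        rw [if_neg h0, if_neg h1]
        have hmid : PySem.Int.floordiv ((xs.length : Int)) 2 = ((xs.length / 2 : Nat) : Int) :=
          PySem.Int.floordiv_natCast xs.length 2
        rw [hmid]
        simp only [PySem.List.slice_to_natCast, PySem.List.slice_from_natCast]
        set a := xs.take (xs.length / 2) with ha
        set b := xs.drop (xs.length / 2) with hb
        have hab : a ++ b = xs := List.take_append_drop _ xs
        have hla : a.length ≤ fuel := by
          simp only [ha, List.length_take]; omega
        have hlb : b.length ≤ fuel := by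
          simp only [hb, List.length_drop]; omega
        rw [ih a hla, ih b hlb]
        by_cases hf : a.any (fun l => PySem.Str.strip l == "END") = true
        · have hpre : pvPrefix xs = pvPrefix a := by
            rw [← hab]; exact pvPrefix_append_of_end a b hf
          have hany : xs.any (fun l => PySem.Str.strip l == "END") = true := by
            rw [← hab]; simp [hf]
          simp [hf, hpre, hany]
        · have hf' : a.any (fun l => PySem.Str.strip l == "END") = false := by
            simpa using hf
          have hpre : pvPrefix xs = a ++ pvPrefix b := by
            rw [← hab]; exact pvPrefix_append_of_no_end a b hf'
          have hany : xs.any (fun l => PySem.Str.strip l == "END")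
              = b.any (fun l => PySem.Str.strip l == "END") := by
            rw [← hab]; simp [hf']
          simp only [hf', if_false]
          rw [hpre, pvStats_append, pvPrefix_of_no_end a hf', hany]
          simp

lemma pvSolve_spec (xs : List String) :
    pvSolve xs = ((pvStats (pvPrefix xs)).1, (pvStats (pvPrefix xs)).2.1,
      (pvStats (pvPrefix xs)).2.2.1, (pvStats (pvPrefix xs)).2.2.2,
      xs.any (fun l => PySem.Str.strip l == "END")) :=
  pvSolveF_spec xs.length xs (Nat.le_refl _)

-- ===== VERDICT (by name: the statement is the Claim_ definition above) =====
theorem analyze_cat_data_spec : Claim_equal_analyze_cat_data := by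
  intro lines _ _
  unfold Spec_analyze_cat_data analyze_cat_data analyze_cat_data_alt
  rw [acdGo_eq_stats, pvSolve_spec]
  simp
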